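-- pv_equiv track=rewrite | github.com/bfmat/LaneDetection | infer/sliding_window_inference_engine.py | find_peak_in_direction
-- ===== SOURCE A (Python) =====
-- def find_peak_in_direction(collection, starting_index, reversed_iteration_direction, minimum_value):
--
--     # Storage for the indices of the first and last values that passed the threshold
--     initial_sufficient_value_index = None
--     final_sufficient_value_index = None
--
--     # Iterate over the row, starting at the center and continuing to the end in the provided direction
--     ending_index = len(collection) - 1 if reversed_iteration_direction else 0
--     iteration_step = -1 if reversed_iteration_direction else 1
--     for i in range(starting_index, ending_index, iteration_step):
--
--         # Get the value of the collection corresponding to the current index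
--         current_element = collection[i]
--
--         # If the value is greater than or equal to the threshold and it is the first such value, record its index
--         if current_element >= minimum_value and initial_sufficient_value_index is None:
--             initial_sufficient_value_index = i
--
--         # If the value is less than the threshold and there have already been values greater than it
--         elif current_element < minimum_value and initial_sufficient_value_index is not None:
--
--             # Set the final index to the current index and break out of the loop
--             final_sufficient_value_index = i
--             break
--
--     # If a peak has not been found, simply return None
--     if initial_sufficient_value_index is None:
--         return None
--
--     # Otherwise, return the average of the two indices, rounded to the nearest integer
--     else:
--         peak_center = int(round((initial_sufficient_value_index + final_sufficient_value_index) / 2))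
--         return peak_center
-- ===== SOURCE B (Python) =====
-- def find_peak_in_direction(collection, starting_index, reversed_iteration_direction, minimum_value):
--     # Run-length decomposition: compress the scanned indices into runs of equal
--     # threshold flags, then read the peak off the first above-threshold run and
--     # the run that follows it.
--     ending_index = len(collection) - 1 if reversed_iteration_direction else 0
--     iteration_step = -1 if reversed_iteration_direction else 1
--     runs = []
--     for i in range(starting_index, ending_index, iteration_step):
--         flag = collection[i] >= minimum_value
--         if not runs or runs[-1][0] != flag:
--             runs.append((flag, i))
--     # Drop a leading below-threshold run; the peak spans the first above-threshold
--     # run and the start of the run after it.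
--     if runs and not runs[0][0]:
--         runs.pop(0)
--     if not runs:
--         return None
--     initial = runs[0][1]
--     if len(runs) < 2:
--         return None
--     final = runs[1][1]
--     return int(round((initial + final) / 2))
-- ===== Notes on version B (the rewrite author's own statement) =====
-- stated objective: alternative
-- what changed: Replaced A's single stateful early-exit scan (two Optional flags and a break) by a run-length encoding of the threshold flags over the whole scanned range, followed by reading the peak off the first above-threshold run and the start of the following run.
-- crash fix: When an above-threshold crossing is found but no later scanned element drops below the threshold, A raises TypeError (final index stays None); B returns None there. — e.g. on find_peak_in_direction([5], -1, false, 3): A raises TypeError, B returns none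
import Mathlib
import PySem

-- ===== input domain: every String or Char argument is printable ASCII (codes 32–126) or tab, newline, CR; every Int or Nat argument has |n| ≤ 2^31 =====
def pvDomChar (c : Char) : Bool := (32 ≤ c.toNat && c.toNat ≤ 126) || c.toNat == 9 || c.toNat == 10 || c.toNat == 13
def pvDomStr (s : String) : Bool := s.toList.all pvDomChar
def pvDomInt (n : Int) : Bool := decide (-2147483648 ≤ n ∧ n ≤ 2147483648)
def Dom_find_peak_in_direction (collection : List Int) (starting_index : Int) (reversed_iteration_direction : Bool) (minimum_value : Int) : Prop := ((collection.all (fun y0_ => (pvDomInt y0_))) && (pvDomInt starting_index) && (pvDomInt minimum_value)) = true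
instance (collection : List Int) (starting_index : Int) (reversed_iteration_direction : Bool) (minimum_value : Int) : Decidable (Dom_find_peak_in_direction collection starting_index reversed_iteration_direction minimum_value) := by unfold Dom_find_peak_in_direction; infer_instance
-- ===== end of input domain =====

-- B replaces A's single stateful early-exit scan by a full-range run-length encoding of the threshold flags plus a small read-off; return values agree on Pre_ (where Python A returns).


-- int(round((a+b)/2)) for Python ints a, b: exact on |a+b| ≤ 2^33 (float division by 2 is
-- exact there), including Python's round-half-to-even rule; s = a + b.
def pyIntRoundHalf (s : Int) : Int :=
  if s % 2 = 0 then s / 2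
  else if ((s - 1) / 2) % 2 = 0 then (s - 1) / 2 else (s - 1) / 2 + 1

-- ===== PORT A =====
-- A's single loop: state = (first index ≥ threshold if seen); returns (initial, final),
-- breaking at the first below-threshold index after initial.  collection[i] is ported with
-- pyGetD (default irrelevant: Pre_ excludes the IndexError inputs).
def loopA (c : List Int) (m : Int) : List Int → Option Int → Option Int × Option Int
  | [], init => (init, none)
  | i :: rest, init =>
    let cur := PySem.List.pyGetD c i 0
    if m ≤ cur ∧ init = none then loopA c m rest (some i)
    else if cur < m ∧ init ≠ none then (init, some i)
    else loopA c m rest init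

def find_peak_in_direction (collection : List Int) (starting_index : Int) (reversed_iteration_direction : Bool) (minimum_value : Int) : Option Int :=
  let ending_index : Int := if reversed_iteration_direction then PySem.List.len collection - 1 else 0
  let iteration_step : Int := if reversed_iteration_direction then -1 else 1
  match loopA collection minimum_value (PySem.List.pyRange starting_index ending_index iteration_step) none with
  | (none, _) => none
  | (some a, some b) => some (pyIntRoundHalf (a + b))
  | (some _, none) => none   -- Python raises TypeError here (initial found, no drop); excluded by Pre_

-- ===== PORT B =====
-- Source B's loop: append (flag, i) whenever the flag differs from the last run's flag.
def buildRuns (c : List Int) (m : Int) : List Int → List (Bool × Int) → List (Bool × Int)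
  | [], runs => runs
  | i :: rest, runs =>
    let flag := decide (m ≤ PySem.List.pyGetD c i 0)
    if runs = [] ∨ runs.getLast?.map Prod.fst ≠ some flag then
      buildRuns c m rest (runs ++ [(flag, i)])
    else buildRuns c m rest runs

def find_peak_in_direction_alt (collection : List Int) (starting_index : Int) (reversed_iteration_direction : Bool) (minimum_value : Int) : Option Int :=
  let ending_index : Int := if reversed_iteration_direction then PySem.List.len collection - 1 else 0
  let iteration_step : Int := if reversed_iteration_direction then -1 else 1
  let runs0 := buildRuns collection minimum_value (PySem.List.pyRange starting_index ending_index iteration_step) []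
  -- if runs and not runs[0][0]: runs.pop(0)
  let runs := match runs0 with
    | (false, _) :: rest => rest
    | r => r
  match runs with
  | [] => none
  | (_, initial) :: rest =>
    match rest with
    | [] => none   -- Python A raises TypeError on these inputs; B returns None
    | (_, final) :: _ => some (pyIntRoundHalf (initial + final))

-- ===== PRECONDITION & SPEC =====
-- Pre_ = exactly the inputs on which Python A returns: it excludes only inputs where A raises —
-- IndexError (reversed direction with starting_index ≥ len, or forward with starting_index < -len)
-- and TypeError (a threshold crossing is found but no later element drops below the threshold;
-- a drop after a crossing forces starting_index ≤ -2, so that bound is stated alongside it).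
def Pre_find_peak_in_direction (collection : List Int) (starting_index : Int) (reversed_iteration_direction : Bool) (minimum_value : Int) : Prop :=
  if reversed_iteration_direction then
    starting_index < PySem.List.len collection
  else
    0 ≤ starting_index ∨
      (-(PySem.List.len collection) ≤ starting_index ∧
        (let T := (collection.drop (PySem.List.len collection + starting_index).toNat).dropWhile
                    (fun x => decide (x < minimum_value));
         T = [] ∨ (starting_index ≤ -2 ∧ T.any (fun x => decide (x < minimum_value)) = true)))
instance (collection : List Int) (starting_index : Int) (reversed_iteration_direction : Bool) (minimum_value : Int) : Decidable (Pre_find_peak_in_direction collection starting_index reversed_iteration_direction minimum_value) := by unfold Pre_find_peak_in_direction; infer_instance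

def pvWitness_find_peak_in_direction : List Int × Int × Bool × Int := ([1, 5, 1], -3, false, 3)

-- When an above-threshold crossing is found but no later scanned element drops below the
-- threshold, A raises TypeError (final index stays None); B returns None there.
def Raises_find_peak_in_direction (collection : List Int) (starting_index : Int) (reversed_iteration_direction : Bool) (minimum_value : Int) : Prop :=
  reversed_iteration_direction = false ∧
  -(PySem.List.len collection) ≤ starting_index ∧ starting_index < 0 ∧
  (let T := (collection.drop (PySem.List.len collection + starting_index).toNat).dropWhile
              (fun x => decide (x < minimum_value));
   T ≠ [] ∧ T.any (fun x => decide (x < minimum_value)) = false)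
instance (collection : List Int) (starting_index : Int) (reversed_iteration_direction : Bool) (minimum_value : Int) : Decidable (Raises_find_peak_in_direction collection starting_index reversed_iteration_direction minimum_value) := by unfold Raises_find_peak_in_direction; infer_instance

def pvRaiseWitness_find_peak_in_direction : List Int × Int × Bool × Int := ([5], -1, false, 3)
def pvRaiseWitnessOut_find_peak_in_direction : Option Int := none

def Spec_find_peak_in_direction (collection : List Int) (starting_index : Int) (reversed_iteration_direction : Bool) (minimum_value : Int) (out : Option Int) : Prop := out = find_peak_in_direction_alt collection starting_index reversed_iteration_direction minimum_value
instance (collection : List Int) (starting_index : Int) (reversed_iteration_direction : Bool) (minimum_value : Int) (out : Option Int) : Decidable (Spec_find_peak_in_direction collection starting_index reversed_iteration_direction minimum_value out) := by unfold Spec_find_peak_in_direction; infer_instance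

-- ===== CLAIM (what is proved, stated in full; the proofs are below) =====
def Claim_equal_find_peak_in_direction : Prop := ∀ (collection : List Int) (starting_index : Int) (reversed_iteration_direction : Bool) (minimum_value : Int), Dom_find_peak_in_direction collection starting_index reversed_iteration_direction minimum_value → Pre_find_peak_in_direction collection starting_index reversed_iteration_direction minimum_value → Spec_find_peak_in_direction collection starting_index reversed_iteration_direction minimum_value (find_peak_in_direction collection starting_index reversed_iteration_direction minimum_value)
def Claim_raises_find_peak_in_direction : Prop := (∀ (collection : List Int) (starting_index : Int) (reversed_iteration_direction : Bool) (minimum_value : Int), Dom_find_peak_in_direction collection starting_index reversed_iteration_direction minimum_value → Raises_find_peak_in_direction collection starting_index reversed_iteration_direction minimum_value → ¬ Pre_find_peak_in_direction collection starting_index reversed_iteration_direction minimum_value) ∧ (Dom_find_peak_in_direction (pvRaiseWitness_find_peak_in_direction.1) (pvRaiseWitness_find_peak_in_direction.2.1) (pvRaiseWitness_find_peak_in_direction.2.2.1) (pvRaiseWitness_find_peak_in_direction.2.2.2) ∧ Raises_find_peak_in_direction (pvRaiseWitness_find_peak_in_direction.1) (pvRaiseWitness_find_peak_in_direction.2.1)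 (pvRaiseWitness_find_peak_in_direction.2.2.1) (pvRaiseWitness_find_peak_in_direction.2.2.2) ∧ find_peak_in_direction_alt (pvRaiseWitness_find_peak_in_direction.1) (pvRaiseWitness_find_peak_in_direction.2.1) (pvRaiseWitness_find_peak_in_direction.2.2.1) (pvRaiseWitness_find_peak_in_direction.2.2.2) = pvRaiseWitnessOut_find_peak_in_direction)

-- ===== LEMMAS AND PROOFS =====

-- Cons-form run-length encoding of the threshold flags: rleGo f L = the runs of L given
-- that the previous run carries flag f.
def rleGo (c : List Int) (m : Int) (f : Bool) : List Int → List (Bool × Int)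
  | [] => []
  | i :: rest =>
    let g := decide (m ≤ PySem.List.pyGetD c i 0)
    if g = f then rleGo c m f rest else (g, i) :: rleGo c m g rest

theorem buildRuns_snoc (c : List Int) (m : Int) :
    ∀ (L : List Int) (acc : List (Bool × Int)) (f : Bool) (j : Int),
      buildRuns c m L (acc ++ [(f, j)]) = acc ++ (f, j) :: rleGo c m f L := by
  intro L
  induction L with
  | nil => intro acc f j; simp [buildRuns, rleGo]
  | cons i rest ih =>
    intro acc f j
    have hlast : (acc ++ [(f, j)]).getLast?.map Prod.fst = some f := by
      rw [List.getLast?_concat]; rfl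
    by_cases h : decide (m ≤ PySem.List.pyGetD c i 0) = f
    · have hcond : ¬ (acc ++ [(f, j)] = [] ∨
          (acc ++ [(f, j)]).getLast?.map Prod.fst ≠ some (decide (m ≤ PySem.List.pyGetD c i 0))) := by
        rw [h, hlast]; simp
      simp only [buildRuns]
      rw [if_neg hcond, ih]
      simp [rleGo, h]
    · have hcond : (acc ++ [(f, j)] = [] ∨
          (acc ++ [(f, j)]).getLast?.map Prod.fst ≠ some (decide (m ≤ PySem.List.pyGetD c i 0))) := by
        rw [hlast]; simp only [ne_eq, Option.some.injEq]
        exact Or.inr fun he => h he.symm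
      simp only [buildRuns]
      rw [if_pos hcond, List.append_assoc, ← List.append_assoc, ih]
      simp [rleGo, h]

theorem buildRuns_nil (c : List Int) (m : Int) (i : Int) (rest : List Int) :
    buildRuns c m (i :: rest) [] =
      (decide (m ≤ PySem.List.pyGetD c i 0), i) ::
        rleGo c m (decide (m ≤ PySem.List.pyGetD c i 0)) rest := by
  have : buildRuns c m (i :: rest) [] =
      buildRuns c m rest ([] ++ [(decide (m ≤ PySem.List.pyGetD c i 0), i)]) := by
    simp [buildRuns]
  rw [this, buildRuns_snoc]
  simp

-- Once the initial index is fixed, A's loop returns the first later below-threshold index.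
theorem loopA_some (c : List Int) (m a : Int) :
    ∀ L : List Int, loopA c m L (some a) =
      (some a, L.find? (fun i => decide (PySem.List.pyGetD c i 0 < m))) := by
  intro L
  induction L with
  | nil => simp [loopA]
  | cons i rest ih =>
    by_cases h : PySem.List.pyGetD c i 0 < m
    · simp [loopA, List.find?, h, not_le.mpr h]
    · simp [loopA, List.find?, h, not_lt.mp h, ih]

-- The head of a run list continuing an above-threshold run is the first below-threshold index.
theorem rleGo_true_head (c : List Int) (m : Int) :
    ∀ r : List Int, (rleGo c m true r).head?.map Prod.snd =
      r.find? (fun i => decide (PySem.List.pyGetD c i 0 < m)) := by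
  intro r
  induction r with
  | nil => simp [rleGo]
  | cons i rest ih =>
    by_cases h : m ≤ PySem.List.pyGetD c i 0
    · simp [rleGo, List.find?, h, not_lt.mpr h, ih]
    · simp [rleGo, List.find?, h, not_le.mp h]

-- A's loop before the crossing, against the runs continuing a below-threshold run.
theorem loopA_false (c : List Int) (m : Int) :
    ∀ r : List Int, loopA c m r none =
      (match rleGo c m false r with
       | [] => (none, none)
       | (_, a) :: more => (some a, more.head?.map Prod.snd)) := by
  intro r
  induction r with
  | nil => simp [loopA, rleGo]
  | cons i rest ih =>
    by_cases h : m ≤ PySem.List.pyGetD c i 0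
    · simp [loopA, rleGo, h, loopA_some, rleGo_true_head]
    · simp [loopA, rleGo, h, not_le.mp h, ih]

-- Core equality: for ANY index list L, A's stateful loop read-out equals B's run read-out.
theorem main_eq (c : List Int) (m : Int) (L : List Int) :
    (match loopA c m L none with
     | (none, _) => (none : Option Int)
     | (some a, some b) => some (pyIntRoundHalf (a + b))
     | (some _, none) => none) =
    (match (match buildRuns c m L [] with
            | (false, _) :: rest => rest
            | r => r) with
     | [] => none
     | (_, initial) :: rest =>
       match rest with
       | [] => (none : Option Int)
       | (_, final) :: _ => some (pyIntRoundHalf (initial + final))) := by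
  cases L with
  | nil => simp [loopA, buildRuns]
  | cons i rest =>
    rw [buildRuns_nil]
    by_cases h : m ≤ PySem.List.pyGetD c i 0
    · simp only [loopA, h, true_and, if_pos, decide_true, loopA_some]
      have hh := rleGo_true_head c m rest
      cases hg : rleGo c m true rest with
      | nil => rw [hg] at hh; simp only [List.head?_nil, Option.map_none] at hh; rw [← hh]
      | cons p more =>
        rw [hg] at hh
        cases p with
        | mk pf pi => simp at hh; simp [← hh]
    · have hd : decide (m ≤ PySem.List.pyGetD c i 0) = false := by simp [h]
      rw [hd]
      have hl : loopA c m (i :: rest) none = loopA c m rest none := by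
        simp [loopA, h]
      rw [hl, loopA_false]
      cases hg : rleGo c m false rest with
      | nil => simp
      | cons p more =>
        cases p with
        | mk pf pi =>
          cases more with
          | nil => simp
          | cons q more2 => cases q with | mk qf qi => simp

-- TypeError forces: crossing found in the forward scan but nothing below threshold after it.
theorem raises_not_pre :
    ∀ (collection : List Int) (starting_index : Int) (reversed_iteration_direction : Bool) (minimum_value : Int),
      Raises_find_peak_in_direction collection starting_index reversed_iteration_direction minimum_value →
      ¬ Pre_find_peak_in_direction collection starting_index reversed_iteration_direction minimum_value := by
  intro c s rev m hR hP
  unfold Raises_find_peak_in_direction at hR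
  obtain ⟨hrev, _hlb, hs, hT, hany⟩ := hR
  subst hrev
  unfold Pre_find_peak_in_direction at hP
  simp only [Bool.false_eq_true, if_false] at hP
  rcases hP with h0 | ⟨_, hT' | ⟨_, hany'⟩⟩
  · omega
  · exact hT hT'
  · rw [hany] at hany'; exact Bool.false_ne_true hany'

theorem find_peak_in_direction_spec : Claim_equal_find_peak_in_direction := by
  intro c s rev m _hDom _hPre
  unfold Spec_find_peak_in_direction
  unfold find_peak_in_direction find_peak_in_direction_alt
  exact main_eq c m (PySem.List.pyRange s (if rev then PySem.List.len c - 1 else 0) (if rev then -1 else 1))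

@[simp] theorem find_peak_in_direction_raises : Claim_raises_find_peak_in_direction := by
  unfold Claim_raises_find_peak_in_direction
  exact ⟨fun c s rev m _ => raises_not_pre c s rev m, by decide⟩
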